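-- pv_equiv track=rewrite | github.com/Gongdoribong/PythonWS | programmers/sdf.py | solution
-- ===== SOURCE A (Python) =====
-- def solution(ingredient):
--     ingLen = len(ingredient)
--     stack = list()
--     answer = 0
--     #0 아무것도 아닌거
--     #1 빵
--     #2 빵 야채
--     #3 빵 야채 고기
--     #4 빵 야채 고기 빵
--
--     if ingredient[0] == 1:
--         stack.append(1)
--     else:
--         stack.append(0)
--
--     for i in range(1, ingLen):
--         last = 0
--         if len(stack) > 0:
--             last = stack.pop()
--         if ingredient[i]>=2 and last == ingredient[i]-1:    #빵 이후 순서가 순서에 맞으면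
--             stack.append(last+1)    #스택에 다음 재료 넣기
--         elif ingredient[i] == 1 and last == 3:  #덮는 빵이면
--             answer += 1 #햄버거 완성
--         elif ingredient[i] == 1:    #빵이면
--             stack.append(last)  #스택에 last 넣고 빵을 넣는다...?
--             stack.append(1)
--         else:   #다 해당 안되면
--             stack.append(last)  #스택에 last 넣고 0을 넣는다...
--             stack.append(0)
--     return answer
-- ===== SOURCE B (Python) =====
-- def solution(ingredient):
--     stack = []
--     answer = 0
--     for x in ingredient:
--         stack.append(x)
--         if stack[-4:] == [1, 2, 3, 1]:
--             del stack[-4:]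
--             answer += 1
--     return answer
-- ===== Notes on version B (the rewrite author's own statement) =====
-- stated objective: simpler
-- what changed: B is the textbook one-pass stack of raw ingredients that counts a burger whenever the top four elements equal [1,2,3,1], replacing A's compressed per-element 'level' stack with its four-way arithmetic branching and pop/re-push bookkeeping.
-- outside the precondition, e.g. on solution([]): A raises IndexError, B returns 0
-- crash fix: On the empty list A raises IndexError (it reads ingredient[0] unconditionally) while B naturally returns 0. — e.g. on solution([]): A raises IndexError, B returns 0
import Mathlib
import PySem

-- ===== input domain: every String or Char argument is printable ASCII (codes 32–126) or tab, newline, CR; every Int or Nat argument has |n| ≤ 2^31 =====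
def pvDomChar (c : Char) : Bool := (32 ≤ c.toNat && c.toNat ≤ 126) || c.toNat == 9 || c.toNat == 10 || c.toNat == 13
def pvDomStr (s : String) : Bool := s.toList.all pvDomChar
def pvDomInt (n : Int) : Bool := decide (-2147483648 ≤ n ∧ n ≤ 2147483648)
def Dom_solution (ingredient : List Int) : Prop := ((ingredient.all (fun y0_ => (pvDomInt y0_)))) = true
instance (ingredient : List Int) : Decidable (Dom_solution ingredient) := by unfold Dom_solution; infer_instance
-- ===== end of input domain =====

-- B replaces A's compressed per-element "level" stack by the textbook stack of raw
-- ingredients with a top-4 pattern match; same one-pass cost, plainer code (objective: simpler).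


-- ===== PORT A =====
-- Python's list used purely as a stack (append / pop at the tail) is represented
-- head-first: `append x` = `x :: stack`, `pop` = head/tail (this encoding is exact).
-- One loop iteration of A (for i in range(1, ingLen)), state = (stack, answer):
def solutionStepA (acc : List Int × Int) (v : Int) : List Int × Int :=
  let stack := acc.1
  let answer := acc.2
  -- last = 0; if len(stack) > 0: last = stack.pop()
  let last : Int := match stack with | [] => 0 | l :: _ => l
  let stack : List Int := match stack with | [] => [] | _ :: rest => rest
  if 2 ≤ v ∧ last = v - 1 then ((last + 1) :: stack, answer)        -- stack.append(last+1)
  else if v = 1 ∧ last = 3 then (stack, answer + 1)                 -- answer += 1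
  else if v = 1 then (1 :: last :: stack, answer)                   -- append(last); append(1)
  else (0 :: last :: stack, answer)                                 -- append(last); append(0)

def solution (ingredient : List Int) : Int :=
  match ingredient with
  | [] => 0        -- Python raises IndexError at ingredient[0]; excluded by Pre_solution
  | h :: t =>
    let stack : List Int := if h = 1 then [1] else [0]
    (t.foldl solutionStepA (stack, 0)).2

-- ===== PORT B =====
-- Same head-first stack encoding: Python's `stack[-4:] == [1,2,3,1]` (tail = top) is
-- `stack.take 4 = [1,3,2,1]` head-first, and `del stack[-4:]` is `stack.drop 4`.
def solutionStepB (acc : List Int × Int) (v : Int) : List Int × Int :=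
  let stack := v :: acc.1                                           -- stack.append(x)
  if stack.take 4 = [1, 3, 2, 1] then (stack.drop 4, acc.2 + 1)
  else (stack, acc.2)

def solution_alt (ingredient : List Int) : Int :=
  (ingredient.foldl solutionStepB ([], 0)).2

-- ===== PRECONDITION & SPEC =====
-- Pre_ excludes only the empty list, on which A raises IndexError (ingredient[0]).
def Pre_solution (ingredient : List Int) : Prop := ingredient ≠ []
instance (ingredient : List Int) : Decidable (Pre_solution ingredient) := by
  unfold Pre_solution; infer_instance
def pvWitness_solution : List Int := [1, 2, 3, 1]

-- On the empty list A raises IndexError (it reads ingredient[0] unconditionally) while B naturally returns 0.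
def Raises_solution (ingredient : List Int) : Prop := ingredient = []
instance (ingredient : List Int) : Decidable (Raises_solution ingredient) := by
  unfold Raises_solution; infer_instance
def pvRaiseWitness_solution : List Int := []
def pvRaiseWitnessOut_solution : Int := 0

def Spec_solution (ingredient : List Int) (out : Int) : Prop := out = solution_alt ingredient
instance (ingredient : List Int) (out : Int) : Decidable (Spec_solution ingredient out) := by
  unfold Spec_solution; infer_instance

-- ===== CLAIM (what is proved, stated in full; the proofs are below) =====
def Claim_equal_solution : Prop := ∀ (ingredient : List Int), Dom_solution ingredient → Pre_solution ingredient → Spec_solution ingredient (solution ingredient)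
def Claim_raises_solution : Prop := (∀ (ingredient : List Int), Dom_solution ingredient → Raises_solution ingredient → ¬ Pre_solution ingredient) ∧ (Dom_solution (pvRaiseWitness_solution) ∧ Raises_solution (pvRaiseWitness_solution) ∧ solution_alt (pvRaiseWitness_solution) = pvRaiseWitnessOut_solution)

-- ===== LEMMAS AND PROOFS =====

-- Simulation relation: `SimRel sA sB` says A's level stack sA represents B's raw stack sB.
-- A level k ≥ 1 at the top of sA stands for the descending run k, k-1, …, 1 at the top of
-- sB (lvl1 / step_up); a 0 in sA is either a "junk" marker standing for one raw
-- non-continuing ingredient v (junk, recording the branch condition under which A pushed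
-- it) or A's phantom bottom 0 (the re-pushed `last` after a pop of the empty stack),
-- which has no B counterpart.
inductive SimRel : List Int → List Int → Prop where
  | nil : SimRel [] []
  | phantom : SimRel [0] []
  | lvl1 {sA sB : List Int} : SimRel sA sB → SimRel (1 :: sA) (1 :: sB)
  | step_up {sA sB : List Int} (k : Int) : 1 ≤ k → SimRel (k :: sA) sB →
      SimRel ((k + 1) :: sA) ((k + 1) :: sB)
  | junk {sA sB : List Int} (v : Int) : v ≠ 1 →
      ¬ (2 ≤ v ∧ (match sA with | [] => (0 : Int) | l :: _ => l) = v - 1) →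
      SimRel sA sB → SimRel (0 :: sA) (v :: sB)

-- the value A's pop yields ("last"), head-defaulting to 0
def topA (sA : List Int) : Int := match sA with | [] => 0 | l :: _ => l

theorem simrel_nil {sB : List Int} (h : SimRel [] sB) : sB = [] := by
  cases h; rfl

theorem inv1 {sA sB : List Int} (h : SimRel sA sB) (ht : topA sA = 1) :
    ∃ sA' sB', sA = 1 :: sA' ∧ sB = 1 :: sB' ∧ SimRel sA' sB' := by
  cases h with
  | nil => simp [topA] at ht
  | phantom => simp [topA] at ht
  | @lvl1 sA' sB' hr => exact ⟨sA', sB', rfl, rfl, hr⟩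
  | @step_up sA' sB' k hk hr => simp [topA] at ht; omega
  | @junk sA' sB' v hv hc hr => simp [topA] at ht

theorem inv2 {sA sB : List Int} (h : SimRel sA sB) (ht : topA sA = 2) :
    ∃ sA' sB', sA = 2 :: sA' ∧ sB = 2 :: 1 :: sB' ∧ SimRel sA' sB' := by
  cases h with
  | nil => simp [topA] at ht
  | phantom => simp [topA] at ht
  | @lvl1 sA' sB' hr => simp [topA] at ht
  | @step_up sA' sB' k hk hr =>
      have hk1 : k = 1 := by simp [topA] at ht; omega
      subst hk1
      obtain ⟨sA'', sB'', h1, h2, h3⟩ := inv1 hr (by simp [topA])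
      have hA : sA' = sA'' := by injection h1
      refine ⟨sA', sB'', by norm_num, by rw [h2]; norm_num, ?_⟩
      rw [hA]; exact h3
  | @junk sA' sB' v hv hc hr => simp [topA] at ht

theorem inv3 {sA sB : List Int} (h : SimRel sA sB) (ht : topA sA = 3) :
    ∃ sA' sB', sA = 3 :: sA' ∧ sB = 3 :: 2 :: 1 :: sB' ∧ SimRel sA' sB' := by
  cases h with
  | nil => simp [topA] at ht
  | phantom => simp [topA] at ht
  | @lvl1 sA' sB' hr => simp [topA] at ht
  | @step_up sA' sB' k hk hr =>
      have hk2 : k = 2 := by simp [topA] at ht; omega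
      subst hk2
      obtain ⟨sA'', sB'', h1, h2, h3⟩ := inv2 hr (by simp [topA])
      have hA : sA' = sA'' := by injection h1
      refine ⟨sA', sB'', by norm_num, by rw [h2]; norm_num, ?_⟩
      rw [hA]; exact h3
  | @junk sA' sB' v hv hc hr => simp [topA] at ht

theorem fwd1 {sA sB : List Int} (h : SimRel sA sB) (hh : sB.take 1 = [1]) :
    topA sA = 1 := by
  cases h with
  | nil => simp at hh
  | phantom => simp at hh
  | @lvl1 sA' sB' hr => rfl
  | @step_up sA' sB' k hk hr =>
      simp only [List.take_succ_cons] at hh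
      have : k + 1 = 1 := by injection hh
      omega
  | @junk sA' sB' v hv hc hr =>
      simp only [List.take_succ_cons] at hh
      have : v = 1 := by injection hh
      exact absurd this hv

theorem fwd2 {sA sB : List Int} (h : SimRel sA sB) (hh : sB.take 2 = [2, 1]) :
    topA sA = 2 := by
  cases h with
  | nil => simp at hh
  | phantom => simp at hh
  | @lvl1 sA' sB' hr =>
      simp only [List.take_succ_cons] at hh
      have : (1 : Int) = 2 := by injection hh
      omega
  | @step_up sA' sB' k hk hr =>
      simp only [List.take_succ_cons] at hh
      have : k + 1 = 2 := by injection hh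
      simp [topA]; omega
  | @junk sA' sB' v hv hc hr =>
      simp only [List.take_succ_cons] at hh
      have hv2 : v = 2 := by injection hh
      have hb1 : sB'.take 1 = [1] := by injection hh
      have := fwd1 hr hb1
      refine absurd ⟨by omega, ?_⟩ hc
      simp [topA] at this ⊢
      omega

theorem fwd3 {sA sB : List Int} (h : SimRel sA sB) (hh : sB.take 3 = [3, 2, 1]) :
    topA sA = 3 := by
  cases h with
  | nil => simp at hh
  | phantom => simp at hh
  | @lvl1 sA' sB' hr =>
      simp only [List.take_succ_cons] at hh
      have : (1 : Int) = 3 := by injection hh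
      omega
  | @step_up sA' sB' k hk hr =>
      simp only [List.take_succ_cons] at hh
      have : k + 1 = 3 := by injection hh
      simp [topA]; omega
  | @junk sA' sB' v hv hc hr =>
      simp only [List.take_succ_cons] at hh
      have hv3 : v = 3 := by injection hh
      have hb2 : sB'.take 2 = [2, 1] := by injection hh
      have := fwd2 hr hb2
      refine absurd ⟨by omega, ?_⟩ hc
      simp [topA] at this ⊢
      omega

-- unfolded one-step evaluations of the two ports
theorem stepA_cons (a : Int) (rest : List Int) (ans v : Int) :
    solutionStepA (a :: rest, ans) v =
      if 2 ≤ v ∧ a = v - 1 then ((a + 1) :: rest, ans)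
      else if v = 1 ∧ a = 3 then (rest, ans + 1)
      else if v = 1 then (1 :: a :: rest, ans)
      else (0 :: a :: rest, ans) := rfl

theorem stepA_nil (ans v : Int) :
    solutionStepA ([], ans) v =
      if 2 ≤ v ∧ (0 : Int) = v - 1 then ([1], ans)
      else if v = 1 ∧ (0 : Int) = 3 then ([], ans + 1)
      else if v = 1 then ([1, 0], ans)
      else ([0, 0], ans) := rfl

theorem stepB_eval (stack : List Int) (ans v : Int) :
    solutionStepB (stack, ans) v =
      if v :: stack.take 3 = [1, 3, 2, 1] then ((v :: stack).drop 4, ans + 1)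
      else (v :: stack, ans) := by
  simp [solutionStepB, List.take_succ_cons]

theorem step_sim {sA sB : List Int} (ans : Int) (v : Int) (h : SimRel sA sB) :
    SimRel (solutionStepA (sA, ans) v).1 (solutionStepB (sB, ans) v).1 ∧
      (solutionStepA (sA, ans) v).2 = (solutionStepB (sB, ans) v).2 := by
  by_cases h1 : 2 ≤ v ∧ topA sA = v - 1
  · -- A extends the current level; B pushes v (v ≥ 2, so no match)
    obtain ⟨hv2, hlast⟩ := h1
    cases sA with
    | nil => simp [topA] at hlast; omega
    | cons a rest =>
      simp [topA] at hlast
      have hna : ¬ v :: sB.take 3 = [1, 3, 2, 1] := by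
        intro hm
        have hv : v = 1 := by injection hm
        omega
      rw [stepA_cons, if_pos ⟨hv2, hlast⟩, stepB_eval, if_neg hna]
      refine ⟨?_, rfl⟩
      rw [hlast] at h
      have hs := SimRel.step_up (v - 1) (by omega) h
      have hav : v - 1 + 1 = v := by omega
      rw [hav] at hs
      show SimRel ((a + 1) :: rest) (v :: sB)
      rw [hlast, hav]
      exact hs
  · by_cases hv1 : v = 1
    · subst hv1
      by_cases h3 : topA sA = 3
      · -- the covering bread: both sides complete a burger
        obtain ⟨sA', sB', rfl, rfl, hr⟩ := inv3 h h3
        rw [stepA_cons, if_neg (by omega), if_pos ⟨rfl, rfl⟩, stepB_eval,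
          if_pos (by simp [List.take_succ_cons])]
        exact ⟨hr, rfl⟩
      · -- a bread that starts a new burger
        have hna : ¬ (1 : Int) :: sB.take 3 = [1, 3, 2, 1] := by
          intro hm
          have hb : sB.take 3 = [3, 2, 1] := by injection hm
          exact h3 (fwd3 h hb)
        cases sA with
        | nil =>
          have hsB : sB = [] := simrel_nil h
          subst hsB
          rw [stepA_nil, if_neg (by omega), if_neg (by norm_num), if_pos rfl,
            stepB_eval, if_neg hna]
          exact ⟨SimRel.lvl1 SimRel.phantom, rfl⟩
        | cons a rest =>
          simp [topA] at h1 h3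
          rw [stepA_cons, if_neg (by omega), if_neg (by simp [h3]), if_pos rfl,
            stepB_eval, if_neg hna]
          exact ⟨SimRel.lvl1 h, rfl⟩
    · -- a non-continuing ingredient: A pushes a junk 0, B pushes the raw value
      have hna : ¬ v :: sB.take 3 = [1, 3, 2, 1] := by
        intro hm
        have hv : v = 1 := by injection hm
        exact hv1 hv
      cases sA with
      | nil =>
        have hsB : sB = [] := simrel_nil h
        subst hsB
        rw [stepA_nil, if_neg (by intro hc; exact h1 ⟨hc.1, by simpa [topA] using hc.2⟩),
          if_neg (by intro hc; exact hv1 hc.1), if_neg hv1, stepB_eval, if_neg hna]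
        refine ⟨SimRel.junk v hv1 ?_ SimRel.phantom, rfl⟩
        intro hc; simp at hc; omega
      | cons a rest =>
        rw [stepA_cons, if_neg (by intro hc; exact h1 ⟨hc.1, by simpa [topA] using hc.2⟩),
          if_neg (by intro hc; exact hv1 hc.1), if_neg hv1, stepB_eval, if_neg hna]
        refine ⟨SimRel.junk v hv1 ?_ h, rfl⟩
        intro hc; exact h1 ⟨hc.1, by simpa [topA] using hc.2⟩

theorem fold_sim (t : List Int) :
    ∀ (sA sB : List Int) (ans : Int), SimRel sA sB →
    (t.foldl solutionStepA (sA, ans)).2 = (t.foldl solutionStepB (sB, ans)).2 := by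
  induction t with
  | nil => intro _ _ _ _; rfl
  | cons v t ih =>
    intro sA sB ans h
    obtain ⟨hrel, hans⟩ := step_sim ans v h
    simp only [List.foldl]
    rw [show t.foldl solutionStepA (solutionStepA (sA, ans) v) =
        t.foldl solutionStepA ((solutionStepA (sA, ans) v).1, (solutionStepA (sA, ans) v).2) by rfl,
      show t.foldl solutionStepB (solutionStepB (sB, ans) v) =
        t.foldl solutionStepB ((solutionStepB (sB, ans) v).1, (solutionStepB (sB, ans) v).2) by rfl,
      hans]
    exact ih _ _ _ hrel

-- ===== VERDICT (by name: the statement is the Claim_ definition above) =====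
theorem solution_spec : Claim_equal_solution := by
  intro ingredient _ hpre
  unfold Spec_solution
  cases ingredient with
  | nil => exact absurd rfl hpre
  | cons h t =>
    simp only [solution, solution_alt, List.foldl]
    have hB1 : (solutionStepB (([] : List Int), 0) h).1 = [h] := by
      rw [stepB_eval, if_neg (by intro hm; simp at hm)]
    have hB2 : (solutionStepB (([] : List Int), 0) h).2 = 0 := by
      rw [stepB_eval, if_neg (by intro hm; simp at hm)]
    have hinit : SimRel (if h = 1 then [1] else [0]) [h] := by
      by_cases hh : h = 1
      · subst hh; rw [if_pos rfl]; exact SimRel.lvl1 SimRel.nil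
      · rw [if_neg hh]
        refine SimRel.junk h hh ?_ SimRel.nil
        intro hc; simp at hc; omega
    have hfold := fold_sim t (if h = 1 then [1] else [0]) [h] 0 hinit
    rw [show solutionStepB (([] : List Int), 0) h =
      ((solutionStepB (([] : List Int), 0) h).1, (solutionStepB (([] : List Int), 0) h).2) by rfl,
      hB1, hB2]
    exact hfold

@[simp] theorem solution_raises : Claim_raises_solution := by
  unfold Claim_raises_solution
  exact ⟨fun _ _ hr hp => hp hr, by decide⟩
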